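-- pv_equiv track=rewrite | github.com/shenanigansd/scratchpad | events/advent_of_code/2022/01/python/script_day01.py | part_one
-- ===== SOURCE A (Python) =====
-- def part_one(values: list[int | None]) -> int:
--     sums = []
--     total = 0
--     for value in values:
--         if value is None:
--             sums.append(total)
--             total = 0
--         else:
--             total += value
--     return max(sums)
-- ===== SOURCE B (Python) =====
-- def part_one(values: list[int | None]) -> int:
--     boundaries = [i for i, v in enumerate(values) if v is None]
--     totals = []
--     start = -1
--     for idx in boundaries:
--         totals.append(sum(values[start + 1:idx]))
--         start = idx
--     return max(totals)
-- ===== Notes on version B (the rewrite author's own statement) =====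
-- stated objective: alternative
-- what changed: B is two-phase: it first collects the indices of all None separators, then sums the slice of values between consecutive boundaries and takes the max, instead of A's single-pass running-total accumulator.
import Mathlib
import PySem

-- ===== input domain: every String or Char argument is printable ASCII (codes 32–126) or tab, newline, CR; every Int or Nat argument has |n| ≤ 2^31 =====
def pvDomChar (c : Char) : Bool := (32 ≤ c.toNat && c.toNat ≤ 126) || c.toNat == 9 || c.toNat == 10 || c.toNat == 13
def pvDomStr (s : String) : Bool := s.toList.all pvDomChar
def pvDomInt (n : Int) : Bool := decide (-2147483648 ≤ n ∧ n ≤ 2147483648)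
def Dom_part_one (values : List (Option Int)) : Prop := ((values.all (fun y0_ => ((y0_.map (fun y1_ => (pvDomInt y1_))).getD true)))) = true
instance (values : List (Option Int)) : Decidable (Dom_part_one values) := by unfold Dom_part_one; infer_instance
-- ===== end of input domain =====

-- B first collects the indices of all None boundaries, then sums the slice between consecutive
-- boundaries, instead of A's single-pass running accumulator (objective: alternative decomposition, same cost).

-- ===== PORT A =====
-- A: one pass with a running total; on None, append the total to sums and reset.
-- max(sums) raises ValueError when sums is empty (no None in values): excluded by Pre_;
-- the port returns 0 there.
def part_one (values : List (Option Int)) : Int :=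
  (PySem.List.max?
    (values.foldl
      (fun (p : List Int × Int) value =>
        match value with
        | none => (p.1 ++ [p.2], 0)
        | some x => (p.1, p.2 + x)) (([] : List Int), 0)).1
    (fun x => x)).getD 0

-- ===== PORT B =====
-- B, phase 1: boundaries = [i for i, v in enumerate(values) if v is None]
def part_one_bnds (values : List (Option Int)) : List Int :=
  (PySem.List.enumerate values 0).filterMap
    (fun p => if p.2 = (none : Option Int) then some p.1 else none)

-- sum(values[start+1:idx]) in Source B: the slice between consecutive None boundaries contains
-- only ints, so 'v.getD 0' is exact there (a None strictly inside the slice is impossible).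
def part_one_sliceSum (values : List (Option Int)) (a b : Int) : Int :=
  (PySem.List.slice values (some a) (some b)).foldl (fun acc v => acc + v.getD 0) 0

-- B, phase 2: fold over the boundaries keeping (totals, start), then max(totals).
-- max(totals) raises ValueError when values has no None: excluded by Pre_; port returns 0 there.
def part_one_alt (values : List (Option Int)) : Int :=
  (PySem.List.max?
    ((part_one_bnds values).foldl
      (fun (q : List Int × Int) idx => (q.1 ++ [part_one_sliceSum values (q.2 + 1) idx], idx))
      (([] : List Int), -1)).1
    (fun x => x)).getD 0

-- ===== PRECONDITION & SPEC =====
-- Pre_ excludes exactly the inputs with no None, where both A and B raise ValueError (max of empty list).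
def Pre_part_one (values : List (Option Int)) : Prop := (none : Option Int) ∈ values
instance (values : List (Option Int)) : Decidable (Pre_part_one values) := by unfold Pre_part_one; infer_instance
def pvWitness_part_one : List (Option Int) := [some 1, some 2, none, some 5, none]

def Spec_part_one (values : List (Option Int)) (out : Int) : Prop := out = part_one_alt values
instance (values : List (Option Int)) (out : Int) : Decidable (Spec_part_one values out) := by unfold Spec_part_one; infer_instance

-- ===== CLAIM (what is proved, stated in full; the proofs are below) =====
def Claim_equal_part_one : Prop := ∀ (values : List (Option Int)), Dom_part_one values → Pre_part_one values → Spec_part_one values (part_one values)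

-- ===== LEMMAS AND PROOFS =====

-- reference decomposition: the sums of the None-terminated groups, with running total t
def pvGroups : List (Option Int) → Int → List Int
  | [], _ => []
  | (none :: rest), t => t :: pvGroups rest 0
  | (some x :: rest), t => pvGroups rest (t + x)

theorem pvGroups_no_none (l : List (Option Int)) (h : (none : Option Int) ∉ l) (t : Int) :
    pvGroups l t = [] := by
  induction l generalizing t with
  | nil => rfl
  | cons v rest ih =>
    match v with
    | none => simp at h
    | some x => simp at h; exact ih h _

theorem pvGroups_append (pre l : List (Option Int)) (h : (none : Option Int) ∉ pre) (t : Int) :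
    pvGroups (pre ++ l) t = pvGroups l (pre.foldl (fun a v => a + v.getD 0) t) := by
  induction pre generalizing t with
  | nil => rfl
  | cons v rest ih =>
    match v with
    | none => simp at h
    | some x =>
      simp at h
      simpa [pvGroups] using ih h (t + x)

theorem part_one_fold (values : List (Option Int)) (s : List Int) (t : Int) :
    (values.foldl
      (fun (p : List Int × Int) value =>
        match value with
        | none => (p.1 ++ [p.2], 0)
        | some x => (p.1, p.2 + x)) (s, t)).1 = s ++ pvGroups values t := by
  induction values generalizing s t with
  | nil => simp [pvGroups]
  | cons v rest ih =>
    match v with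
    | none => simpa [pvGroups] using ih (s ++ [t]) 0
    | some x => simpa [pvGroups] using ih s (t + x)

-- structural form of the boundary-index comprehension
def pvBnds : List (Option Int) → Nat → List Int
  | [], _ => []
  | (none :: rest), k => (k : Int) :: pvBnds rest (k + 1)
  | (some _ :: rest), k => pvBnds rest (k + 1)

theorem bnds_eq_pvBnds (values : List (Option Int)) (k : Nat) :
    (PySem.List.enumerate values (k : Int)).filterMap
      (fun p => if p.2 = (none : Option Int) then some p.1 else none) = pvBnds values k := by
  induction values generalizing k with
  | nil => simp [PySem.List.enumerate_nil, pvBnds]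
  | cons v rest ih =>
    match v with
    | none =>
      rw [PySem.List.enumerate_cons]
      simpa [pvBnds, List.filterMap_cons] using ih (k + 1)
    | some x =>
      rw [PySem.List.enumerate_cons]
      simpa [pvBnds, List.filterMap_cons] using ih (k + 1)

theorem part_one_alt_fold (values : List (Option Int)) :
    ∀ (suf pend : List (Option Int)) (k s : Nat) (acc : List Int),
      s + pend.length = k →
      values.drop s = pend ++ suf →
      (none : Option Int) ∉ pend →
      ((pvBnds suf k).foldl
        (fun (q : List Int × Int) idx => (q.1 ++ [part_one_sliceSum values (q.2 + 1) idx], idx))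
        (acc, (s : Int) - 1)).1
      = acc ++ pvGroups (pend ++ suf) 0 := by
  intro suf
  induction suf with
  | nil =>
    intro pend k s acc hk hdrop hnone
    simp [pvBnds]
    exact pvGroups_no_none _ hnone 0
  | cons v rest ih =>
    intro pend k s acc hk hdrop hnone
    match v with
    | some x =>
      have hih := ih (pend ++ [some x]) (k + 1) s acc
        (by simp; omega) (by rw [hdrop]; simp) (by simp [hnone])
      rw [pvBnds, hih]
      congr 2
      simp
    | none =>
      have hpend : PySem.List.slice values (some (s : Int)) (some (k : Int)) = pend := by
        rw [PySem.List.slice_natCast, show k - s = pend.length by omega, hdrop, List.take_left]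
      have hsum : part_one_sliceSum values (((s : Int) - 1) + 1) (k : Int)
          = pend.foldl (fun a v => a + v.getD 0) 0 := by
        unfold part_one_sliceSum
        rw [show ((s : Int) - 1) + 1 = (s : Int) by ring, hpend]
      have hdropk1 : values.drop (k + 1) = rest := by
        have h2 : values.drop (k + 1) = (values.drop s).drop (k + 1 - s) := by
          rw [List.drop_drop]; congr 1; omega
        rw [h2, hdrop, show k + 1 - s = (pend ++ [(none : Option Int)]).length by simp; omega,
          show pend ++ (none : Option Int) :: rest = (pend ++ [none]) ++ rest by simp,
          List.drop_left]
      have hih := ih [] (k + 1) (k + 1) (acc ++ [pend.foldl (fun a v => a + v.getD 0) 0])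
        (by simp) (by simp [hdropk1]) (by simp)
      rw [pvBnds, List.foldl_cons]
      simp only [hsum]
      rw [show ((k : Int)) = ((k + 1 : Nat) : Int) - 1 by push_cast; ring]
      simp only [List.nil_append] at hih
      rw [hih, pvGroups_append _ _ hnone 0, pvGroups]
      simp

-- ===== VERDICT (by name: the statement is the Claim_ definition above) =====
theorem part_one_spec : Claim_equal_part_one := by
  intro values _ _
  unfold Spec_part_one part_one part_one_alt part_one_bnds
  rw [part_one_fold values [] 0]
  rw [show (0 : Int) = ((0 : Nat) : Int) by norm_num, bnds_eq_pvBnds]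
  have h := part_one_alt_fold values values [] 0 0 [] (by simp) (by simp) (by simp)
  simp only [List.nil_append] at h ⊢
  rw [show ((0 : Nat) : Int) - 1 = (-1 : Int) by norm_num] at h
  rw [h]
  norm_num
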